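-- pv_equiv track=rewrite | github.com/Varnook/8-bit_toy_pc-logisim- | assembler.py | traducirEtiquetas
-- ===== SOURCE A (Python) =====
-- instrucciones = {
--         "ADD"  :  2,
--         "SUB"  :  4,
--         "NEG"  :  6,
--         "SHR"  :  8,
--         "SHL"  : 10,
--         "OR"   : 12,
--         "XOR"  : 14,      # Misma idea que en microcoder. Ahora cada instrucción
--         "AND"  : 16,      # tiene un valor que se mueve 3 bits a la izquierda y
--         "CMP"  : 18,      # se traduce a hexa.
--         "MOV"  : 20,
--         "SETM" : 22,
--         "SETR" : 23,
--         "JC"   : 24,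
--         "JZ"   : 25,
--         "JN"   : 26,
--         "JMP"  : 27,
--         "CALL" : 28,
--         "RET"  : 29,
--         "DISP" : 30,
--         "JOY"  : 31
-- }
--
-- def traducirEtiquetas(lineas_texto):
--     etiquetas = encontrarEtiquetas(lineas_texto)        # Se genera un diccionario con los valores de cada etiqueta. Esos valores
--     resultado = []                                      # se obtienen con una función auxiliar. Después se reemplazan los strings
--                                                         # de las etiquetas por estos valores y, siempre que la instrucción no sea
--     for linea in lineas_texto:                          # seguida por un registro, se agrega al final de la instrucción: una ','.
--
--         instr = [clave for clave in instrucciones.keys() if clave in linea]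
--         etiqueta = [clave for clave in etiquetas.keys() if clave in linea]
--
--         if instr:
--             cantL = len(instr[0])       # Cantidad Letras
--
--             if etiqueta:
--                 aReemplazar = linea
--
--                 while etiqueta:
--                     et = max(etiqueta, key=len)
--                     aReemplazar = aReemplazar.replace(et, hex(etiquetas[et]))
--                     etiqueta.remove(et)
--
--                 if aReemplazar[cantL] not in ',R':
--                     aReemplazar = aReemplazar[:cantL] + ',' + aReemplazar[cantL:]
--
--                 resultado.append(aReemplazar)
--
--             else:
--                 if len(linea) > cantL and linea[cantL] == '0':
--                     resultado.append(linea[:cantL] + ',' + linea[cantL:])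
--                 else:
--                     resultado.append(linea)
--
--     return resultado;
--
-- def encontrarEtiquetas(lineas_texto):
--     nro_inst  = 0                             # Se buscan las posiciones de memoria de las etiquetas marcadas
--     etiquetas = {}                            # con ':'. Además el programa tiene la capacidad de asignar una
--                                               # posición definida manualmente si después de los ':' hay algún
--     for i in range(len(lineas_texto)):        # número (en hexa).
--         linea = lineas_texto[i]
--
--         if [clave for clave in instrucciones.keys() if clave in linea]:
--
--             if "RET" in linea:
--                 nro_inst += 1
--             else:
--                 nro_inst += 2
--
--         else:
--             if '0x' not in linea:
--                 siguiente = lineas_texto[i + 1]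
--
--                 if len(siguiente) == 4 and '0x' in siguiente:
--                     etiquetas[linea] = int(lineas_texto[i + 1], 16)
--                 else:
--                     etiquetas[linea] = nro_inst
--
--     return etiquetas;
-- ===== SOURCE B (Python) =====
-- instrucciones = {
--         "ADD"  :  2,
--         "SUB"  :  4,
--         "NEG"  :  6,
--         "SHR"  :  8,
--         "SHL"  : 10,
--         "OR"   : 12,
--         "XOR"  : 14,
--         "AND"  : 16,
--         "CMP"  : 18,
--         "MOV"  : 20,
--         "SETM" : 22,
--         "SETR" : 23,
--         "JC"   : 24,
--         "JZ"   : 25,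
--         "JN"   : 26,
--         "JMP"  : 27,
--         "CALL" : 28,
--         "RET"  : 29,
--         "DISP" : 30,
--         "JOY"  : 31
-- }
--
--
-- def _tablaEtiquetas(lineas_texto):
--     # label -> address, walking the lines once with a running address counter
--     etiquetas = {}
--     direccion = 0
--     for i, linea in enumerate(lineas_texto):
--         if any(c in linea for c in instrucciones):
--             direccion += 1 if "RET" in linea else 2
--         elif '0x' not in linea:
--             siguiente = lineas_texto[i + 1]
--             if len(siguiente) == 4 and '0x' in siguiente:
--                 etiquetas[linea] = int(siguiente, 16)
--             else:
--                 etiquetas[linea] = direccion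
--     return etiquetas
--
--
-- def traducirEtiquetas(lineas_texto):
--     etiquetas = _tablaEtiquetas(lineas_texto)
--     # one precomputed substitution order: longest label first, ties in
--     # original (insertion) order via the stable sort
--     orden = sorted(etiquetas, key=len, reverse=True)
--     resultado = []
--     for linea in lineas_texto:
--         instr = next((c for c in instrucciones if c in linea), None)
--         if instr is None:
--             continue
--         n = len(instr)
--         pres = [e for e in orden if e in linea]
--         if pres:
--             for e in pres:
--                 linea = linea.replace(e, hex(etiquetas[e]))
--             if linea[n] not in ',R':
--                 linea = linea[:n] + ',' + linea[n:]
--         elif len(linea) > n and linea[n] == '0':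
--             linea = linea[:n] + ',' + linea[n:]
--         resultado.append(linea)
--     return resultado
-- ===== Notes on version B (the rewrite author's own statement) =====
-- stated objective: alternative
-- what changed: The inner while-loop that repeatedly rescans the per-line label list for the longest label (max(key=len) then remove) is replaced by one precomputed stable length-descending sort of the label table, filtered per line; the label table and line scan are built with enumerate/any/next instead of index loops and list-comprehension truthiness tests.
import Mathlib
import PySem

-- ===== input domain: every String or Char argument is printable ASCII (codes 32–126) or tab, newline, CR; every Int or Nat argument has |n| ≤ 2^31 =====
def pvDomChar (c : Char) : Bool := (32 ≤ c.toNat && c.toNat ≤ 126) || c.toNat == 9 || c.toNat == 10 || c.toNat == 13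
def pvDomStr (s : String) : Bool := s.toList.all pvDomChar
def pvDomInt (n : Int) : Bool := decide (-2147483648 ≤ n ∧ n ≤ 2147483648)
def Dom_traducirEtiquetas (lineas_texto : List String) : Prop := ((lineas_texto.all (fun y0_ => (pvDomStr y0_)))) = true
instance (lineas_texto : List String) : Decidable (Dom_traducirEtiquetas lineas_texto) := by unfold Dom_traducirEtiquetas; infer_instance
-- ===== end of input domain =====

-- B replaces A's inner `while etiqueta: et = max(etiqueta, key=len); …; etiqueta.remove(et)`
-- selection loop by one precomputed stable length-descending sort of the label table,
-- and builds the table/line scan with enumerate/next/any instead of index loops (objective: alternative).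

-- shared module-level constant (the Python dict `instrucciones`)
def instrucciones : PySem.Dict String Int :=
  ⟨[("ADD", 2), ("SUB", 4), ("NEG", 6), ("SHR", 8), ("SHL", 10), ("OR", 12), ("XOR", 14),
    ("AND", 16), ("CMP", 18), ("MOV", 20), ("SETM", 22), ("SETR", 23), ("JC", 24), ("JZ", 25),
    ("JN", 26), ("JMP", 27), ("CALL", 28), ("RET", 29), ("DISP", 30), ("JOY", 31)]⟩

-- Python's hex(): exact hand port (PySem has no hex); lowercase digits, "0x"/"-0x" prefix
def pyHexDigit (n : Nat) : Char :=
  ['0','1','2','3','4','5','6','7','8','9','a','b','c','d','e','f'].getD n '0'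

-- fuel (≥ number of hex digits) only makes the digit loop structurally total
def pyHexNat : Nat → Nat → List Char
  | 0, _ => []
  | f + 1, n => if n < 16 then [pyHexDigit n] else pyHexNat f (n / 16) ++ [pyHexDigit (n % 16)]

def pyHex (n : Int) : String :=
  if n < 0 then String.ofList ('-' :: '0' :: 'x' :: pyHexNat (-n).toNat.succ (-n).toNat)
  else String.ofList ('0' :: 'x' :: pyHexNat n.toNat.succ n.toNat)

-- ===== PORT A =====
-- helper encontrarEtiquetas, transliterated: `for i in range(len(lineas_texto))`
-- with state (nro_inst, etiquetas).  lineas_texto[i+1] raises IndexError when out of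
-- range and int(siguiente, 16) raises ValueError when unparsable: Pre_ excludes both,
-- the getD defaults are unreachable there.
def encontrarEtiquetas (lineas_texto : List String) : PySem.Dict String Int :=
  ((PySem.List.pyRange 0 (PySem.List.len lineas_texto) 1).foldl
    (fun (st : Int × PySem.Dict String Int) i =>
      let linea := PySem.List.pyGetD lineas_texto i ""
      if (instrucciones.keys.filter (fun clave => PySem.Str.isIn clave linea)) ≠ [] then
        if PySem.Str.isIn "RET" linea then (st.1 + 1, st.2) else (st.1 + 2, st.2)
      else
        if ¬ (PySem.Str.isIn "0x" linea = true) then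
          let siguiente := PySem.List.pyGetD lineas_texto (i + 1) ""
          if PySem.Str.len siguiente = 4 ∧ PySem.Str.isIn "0x" siguiente then
            (st.1, st.2.insert linea ((PySem.Int.ofStrBase? siguiente 16).getD 0))
          else
            (st.1, st.2.insert linea st.1)
        else st)
    (0, ⟨[]⟩)).2

-- `while etiqueta: et = max(etiqueta, key=len); aReemplazar = aReemplazar.replace(et, hex(etiquetas[et])); etiqueta.remove(et)`
-- fuel (≥ etiqueta.length; each pass removes one label) only makes the loop structurally total
def whileReplace (etiquetas : PySem.Dict String Int) : Nat → String → List String → String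
  | 0, aReemplazar, _ => aReemplazar
  | fuel + 1, aReemplazar, etiqueta =>
    match PySem.List.max? etiqueta (fun s => PySem.Str.len s) with
    | none => aReemplazar
    | some et =>
      match PySem.List.remove? etiqueta et with
      | none => aReemplazar   -- unreachable: et ∈ etiqueta
      | some rest => whileReplace etiquetas fuel (PySem.Str.replace aReemplazar et (pyHex (etiquetas.getD et 0))) rest

-- `aReemplazar[cantL] not in ',R'` (IndexError when out of range: excluded by Pre_)
def notInComma (aR : String) (cantL : Int) : Bool :=
  match PySem.Str.pyGet? aR cantL with
  | some c => !(c == ',' || c == 'R')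
  | none => false

def traducirEtiquetas (lineas_texto : List String) : List String :=
  let etiquetas := encontrarEtiquetas lineas_texto
  lineas_texto.foldl
    (fun resultado linea =>
      let instr := instrucciones.keys.filter (fun clave => PySem.Str.isIn clave linea)
      let etiqueta := etiquetas.keys.filter (fun clave => PySem.Str.isIn clave linea)
      match instr with
      | [] => resultado
      | i0 :: _ =>
        let cantL := PySem.Str.len i0
        if etiqueta ≠ [] then
          let aReemplazar := whileReplace etiquetas etiqueta.length linea etiqueta
          if notInComma aReemplazar cantL then
            resultado ++ [PySem.Str.slice aReemplazar none (some cantL) ++ "," ++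
                          PySem.Str.slice aReemplazar (some cantL) none]
          else resultado ++ [aReemplazar]
        else
          if PySem.Str.len linea > cantL ∧ PySem.Str.pyGet? linea cantL = some '0' then
            resultado ++ [PySem.Str.slice linea none (some cantL) ++ "," ++
                          PySem.Str.slice linea (some cantL) none]
          else resultado ++ [linea])
    []

-- ===== PORT B =====
-- Source B's _tablaEtiquetas: `for i, linea in enumerate(lineas_texto)` with any()
def tablaEtiquetas (lineas_texto : List String) : PySem.Dict String Int :=
  ((PySem.List.enumerate lineas_texto 0).foldl
    (fun (st : Int × PySem.Dict String Int) p =>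
      if instrucciones.keys.any (fun c => PySem.Str.isIn c p.2) then
        (st.1 + (if PySem.Str.isIn "RET" p.2 then 1 else 2), st.2)
      else if ¬ (PySem.Str.isIn "0x" p.2 = true) then
        let siguiente := PySem.List.pyGetD lineas_texto (p.1 + 1) ""
        if PySem.Str.len siguiente = 4 ∧ PySem.Str.isIn "0x" siguiente then
          (st.1, st.2.insert p.2 ((PySem.Int.ofStrBase? siguiente 16).getD 0))
        else (st.1, st.2.insert p.2 st.1)
      else st)
    (0, ⟨[]⟩)).2

def traducirEtiquetas_alt (lineas_texto : List String) : List String :=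
  let etiquetas := tablaEtiquetas lineas_texto
  let orden := PySem.List.sorted etiquetas.keys (fun s => PySem.Str.len s) true
  lineas_texto.foldl
    (fun resultado linea =>
      match instrucciones.keys.find? (fun c => PySem.Str.isIn c linea) with
      | none => resultado
      | some instr =>
        let n := PySem.Str.len instr
        let pres := orden.filter (fun e => PySem.Str.isIn e linea)
        if pres ≠ [] then
          let r := pres.foldl (fun s e => PySem.Str.replace s e (pyHex (etiquetas.getD e 0))) linea
          if notInComma r n then
            resultado ++ [PySem.Str.slice r none (some n) ++ "," ++
                          PySem.Str.slice r (some n) none]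
          else resultado ++ [r]
        else
          if PySem.Str.len linea > n ∧ PySem.Str.pyGet? linea n = some '0' then
            resultado ++ [PySem.Str.slice linea none (some n) ++ "," ++
                          PySem.Str.slice linea (some n) none]
          else resultado ++ [linea])
    []

-- ===== PRECONDITION & SPEC =====
-- Pre-side replicas (closure must not reach the ports): the label keys, table and
-- substituted line are recomputed here because whether `aReemplazar[cantL]` exists
-- genuinely depends on the substituted string — Pre_ excludes exactly A's raises
-- (IndexError on a trailing label line, ValueError from int(_,16), IndexError at
-- aReemplazar[cantL]) and nothing else.
def pvClaves : List String :=
  ["ADD", "SUB", "NEG", "SHR", "SHL", "OR", "XOR", "AND", "CMP", "MOV", "SETM", "SETR",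
   "JC", "JZ", "JN", "JMP", "CALL", "RET", "DISP", "JOY"]

def pvTabla (lineas_texto : List String) : PySem.Dict String Int :=
  ((PySem.List.enumerate lineas_texto 0).foldl
    (fun (st : Int × PySem.Dict String Int) p =>
      if pvClaves.any (fun c => PySem.Str.isIn c p.2) then
        (st.1 + (if PySem.Str.isIn "RET" p.2 then 1 else 2), st.2)
      else if ¬ (PySem.Str.isIn "0x" p.2 = true) then
        let sig := PySem.List.pyGetD lineas_texto (p.1 + 1) ""
        (st.1, st.2.insert p.2 (if PySem.Str.len sig = 4 ∧ PySem.Str.isIn "0x" sig then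
            (PySem.Int.ofStrBase? sig 16).getD 0 else st.1))
      else st)
    (0, ⟨[]⟩)).2

def pvHex (n : Int) : String :=
  if n < 0 then String.ofList ('-' :: '0' :: 'x' :: Nat.toDigits 16 (-n).toNat)
  else String.ofList ('0' :: 'x' :: Nat.toDigits 16 n.toNat)

def pvSubst (tabla : PySem.Dict String Int) (linea : String) : String :=
  ((PySem.List.sorted tabla.keys (fun s => PySem.Str.len s) true).filter
      (fun e => PySem.Str.isIn e linea)).foldl
    (fun s e => PySem.Str.replace s e (pvHex (tabla.getD e 0))) linea

def Pre_traducirEtiquetas (lineas_texto : List String) : Prop :=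
  (∀ p ∈ PySem.List.enumerate lineas_texto 0,
      (¬ pvClaves.any (fun c => PySem.Str.isIn c p.2) = true) →
      (¬ PySem.Str.isIn "0x" p.2 = true) →
      (p.1 + 1 < (lineas_texto.length : Int) ∧
       (PySem.Str.len (PySem.List.pyGetD lineas_texto (p.1 + 1) "") = 4 →
        PySem.Str.isIn "0x" (PySem.List.pyGetD lineas_texto (p.1 + 1) "") = true →
        (PySem.Int.ofStrBase? (PySem.List.pyGetD lineas_texto (p.1 + 1) "") 16).isSome = true))) ∧
  (∀ linea ∈ lineas_texto,
      ∀ c0 ∈ pvClaves.find? (fun c => PySem.Str.isIn c linea),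
        ((pvTabla lineas_texto).keys.filter (fun e => PySem.Str.isIn e linea) ≠ []) →
        PySem.Str.len c0 < PySem.Str.len (pvSubst (pvTabla lineas_texto) linea))

instance (lineas_texto : List String) : Decidable (Pre_traducirEtiquetas lineas_texto) := by
  unfold Pre_traducirEtiquetas; infer_instance

def pvWitness_traducirEtiquetas : List String := ["loop", "JMPloop", "RET"]

def Spec_traducirEtiquetas (lineas_texto : List String) (out : List String) : Prop := out = traducirEtiquetas_alt lineas_texto
instance (lineas_texto : List String) (out : List String) : Decidable (Spec_traducirEtiquetas lineas_texto out) := by unfold Spec_traducirEtiquetas; infer_instance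

-- ===== CLAIM (what is proved, stated in full; the proofs are below) =====
def Claim_equal_traducirEtiquetas : Prop := ∀ (lineas_texto : List String), Dom_traducirEtiquetas lineas_texto → Pre_traducirEtiquetas lineas_texto → Spec_traducirEtiquetas lineas_texto (traducirEtiquetas lineas_texto)

-- ===== LEMMAS AND PROOFS =====

-- --- the stable descending sort extracts first maxima, as A's max/remove loop does ---

-- the fold step of PySem.List.max?
def pvGo {α κ : Type} [LinearOrder κ] (key : α → κ) : Option α → α → Option α :=
  fun acc x => match acc with
    | none => some x
    | some m => if key m < key x then some x else some m

theorem pv_max?_eq_foldl {α κ : Type} [LinearOrder κ] (xs : List α) (key : α → κ) :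
    PySem.List.max? xs key = xs.foldl (pvGo key) none := rfl

theorem pv_go_aux {α κ : Type} [LinearOrder κ] (key : α → κ) :
    ∀ (xs : List α) (a m : α), xs.foldl (pvGo key) (some a) = some m →
    ∃ l r, a :: xs = l ++ m :: r ∧ (∀ y ∈ l, key y < key m) ∧ (∀ y ∈ r, key y ≤ key m) := by
  intro xs
  induction xs with
  | nil =>
    intro a m h
    simp only [List.foldl_nil, Option.some.injEq] at h
    exact ⟨[], [], by simp [h], by simp, by simp⟩
  | cons x t ih =>
    intro a m h
    simp only [List.foldl_cons] at h
    by_cases hlt : key a < key x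
    · rw [show pvGo key (some a) x = some x by simp [pvGo, hlt]] at h
      obtain ⟨l', r', hsplit, hl', hr'⟩ := ih x m h
      refine ⟨a :: l', r', by simp [hsplit], ?_, hr'⟩
      intro y hy
      rcases List.mem_cons.mp hy with rfl | hy'
      · -- key a < key x ≤ key m
        cases l' with
        | nil =>
          simp only [List.nil_append, List.cons.injEq] at hsplit
          exact hsplit.1 ▸ hlt
        | cons b l'' =>
          simp only [List.cons_append, List.cons.injEq] at hsplit
          exact lt_trans hlt (hsplit.1 ▸ hl' b (by simp))
      · exact hl' y hy'
    · rw [show pvGo key (some a) x = some a by simp [pvGo, hlt]] at h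
      obtain ⟨l, r, hsplit, hl, hr⟩ := ih a m h
      cases l with
      | nil =>
        simp only [List.nil_append, List.cons.injEq] at hsplit
        obtain ⟨rfl, rfl⟩ := hsplit
        exact ⟨[], x :: t, rfl, by simp, by
          intro y hy
          rcases List.mem_cons.mp hy with rfl | hy'
          · exact le_of_not_gt hlt
          · exact hr y hy'⟩
      | cons b l'' =>
        simp only [List.cons_append, List.cons.injEq] at hsplit
        obtain ⟨rfl, ht⟩ := hsplit
        refine ⟨a :: x :: l'', r, by simp [ht], ?_, hr⟩
        intro y hy
        have hbm : key a < key m := hl a (by simp)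
        rcases List.mem_cons.mp hy with rfl | hy'
        · exact hbm
        · rcases List.mem_cons.mp hy' with rfl | hy''
          · exact lt_of_le_of_lt (le_of_not_gt hlt) hbm
          · exact hl y (by simp [hy''])



-- first-max decomposition produced by PySem.List.max?
theorem pv_max?_split {α κ : Type} [LinearOrder κ] {xs : List α} {key : α → κ} {m : α}
    (h : PySem.List.max? xs key = some m) :
    ∃ l r, xs = l ++ m :: r ∧ (∀ y ∈ l, key y < key m) ∧ (∀ y ∈ r, key y ≤ key m) := by
  cases xs with
  | nil => simp [pv_max?_eq_foldl] at h
  | cons x t =>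
    rw [pv_max?_eq_foldl, List.foldl_cons] at h
    exact pv_go_aux key t x m h

theorem pv_max?_of_split {α κ : Type} [LinearOrder κ] (key : α → κ) (l r : List α) (m : α)
    (hl : ∀ y ∈ l, key y < key m) (hr : ∀ y ∈ r, key y ≤ key m) :
    PySem.List.max? (l ++ m :: r) key = some m := by
  have keep : ∀ (rr : List α) (a : α), (∀ y ∈ rr, key y ≤ key a) → rr.foldl (pvGo key) (some a) = some a := by
    intro rr
    induction rr with
    | nil => intro a _; rfl
    | cons y t ih =>
      intro a ha
      rw [List.foldl_cons,
        show pvGo key (some a) y = some a by simp [pvGo, not_lt_of_ge (ha y (by simp))]]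
      exact ih a (fun z hz => ha z (by simp [hz]))
  have reach : ∀ (ll : List α) (o : Option α),
      (o = none ∨ ∃ a, o = some a ∧ key a < key m) → (∀ y ∈ ll, key y < key m) →
      (ll ++ m :: r).foldl (pvGo key) o = r.foldl (pvGo key) (some m) := by
    intro ll
    induction ll with
    | nil =>
      intro o ho _
      rw [List.nil_append, List.foldl_cons]
      rcases ho with rfl | ⟨a, rfl, ha⟩
      · rfl
      · rw [show pvGo key (some a) m = some m by simp [pvGo, ha]]
    | cons x t ih =>
      intro o ho hll
      rw [List.cons_append, List.foldl_cons]
      refine ih (pvGo key o x) ?_ (fun y hy => hll y (by simp [hy]))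
      have hx : key x < key m := hll x (by simp)
      rcases ho with rfl | ⟨a, rfl, ha⟩
      · exact Or.inr ⟨x, rfl, hx⟩
      · simp only [pvGo]
        by_cases hax : key a < key x
        · exact Or.inr ⟨x, by simp [hax], hx⟩
        · exact Or.inr ⟨a, by simp [hax], ha⟩
  rw [pv_max?_eq_foldl, reach l none (Or.inl rfl) hl, keep r m hr]

-- the insertion step of PySem.List.sorted (reverse=True)
def pvIns {α κ : Type} [LinearOrder κ] (key : α → κ) (x : α) (acc : List α) : List α :=
  PySem.List.insertBy (fun a b => decide (key b < key a)) x acc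

theorem pv_sorted_rev_eq_foldl_pvIns {α κ : Type} [LinearOrder κ] (xs : List α) (key : α → κ) :
    PySem.List.sorted xs key true = xs.foldl (fun acc x => pvIns key x acc) [] :=
  PySem.List.sorted_rev_eq_foldl_insertBy xs key

theorem pv_ins_front {α κ : Type} [LinearOrder κ] (key : α → κ) (m : α) (acc : List α)
    (h : ∀ y ∈ acc, key y < key m) : pvIns key m acc = m :: acc := by
  cases acc with
  | nil => rfl
  | cons y t => simp [pvIns, PySem.List.insertBy, h y (by simp)]

theorem pv_ins_skip {α κ : Type} [LinearOrder κ] (key : α → κ) (y m : α) (t : List α)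
    (h : key y ≤ key m) : pvIns key y (m :: t) = m :: pvIns key y t := by
  simp [pvIns, PySem.List.insertBy, not_lt_of_ge h]

theorem pv_mem_foldl_ins {α κ : Type} [LinearOrder κ] (key : α → κ) :
    ∀ (l acc : List α) (x : α), x ∈ l.foldl (fun acc z => pvIns key z acc) acc → x ∈ acc ∨ x ∈ l := by
  intro l
  induction l with
  | nil => intro acc x h; exact Or.inl h
  | cons z t ih =>
    intro acc x h
    rw [List.foldl_cons] at h
    rcases ih (pvIns key z acc) x h with hin | hin
    · rcases (PySem.List.mem_insertBy _ _ _ _).mp hin with rfl | hin'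
      · exact Or.inr (by simp)
      · exact Or.inl hin'
    · exact Or.inr (by simp [hin])

theorem pv_foldl_ins_head {α κ : Type} [LinearOrder κ] (key : α → κ) (m : α) :
    ∀ (r c : List α), (∀ y ∈ r, key y ≤ key m) →
    r.foldl (fun acc z => pvIns key z acc) (m :: c) = m :: r.foldl (fun acc z => pvIns key z acc) c := by
  intro r
  induction r with
  | nil => intro c _; rfl
  | cons y t ih =>
    intro c hr
    rw [List.foldl_cons, List.foldl_cons, pv_ins_skip key y m c (hr y (by simp))]
    exact ih (pvIns key y c) (fun z hz => hr z (by simp [hz]))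

-- sorted(xs, key, reverse=True) = first max :: sorted(rest)
theorem pv_sorted_rev_eq_max_cons {α κ : Type} [BEq α] [LawfulBEq α] [LinearOrder κ]
    (xs : List α) (key : α → κ) {m : α} (h : PySem.List.max? xs key = some m) :
    PySem.List.sorted xs key true = m :: PySem.List.sorted (xs.erase m) key true := by
  obtain ⟨l, r, rfl, hl, hr⟩ := pv_max?_split h
  have hmem : m ∉ l := fun hm => absurd (hl m hm) (lt_irrefl _)
  have herase : (l ++ m :: r).erase m = l ++ r := by
    rw [List.erase_append_right _ hmem, List.erase_cons_head]
  rw [herase, pv_sorted_rev_eq_foldl_pvIns, pv_sorted_rev_eq_foldl_pvIns, List.foldl_append,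
    List.foldl_cons, List.foldl_append]
  have hal : ∀ y ∈ l.foldl (fun acc z => pvIns key z acc) [], key y < key m := by
    intro y hy
    rcases pv_mem_foldl_ins key l [] y hy with h0 | h0
    · simp at h0
    · exact hl y h0
  rw [pv_ins_front key m _ hal, pv_foldl_ins_head key m r _ hr]

-- A's while-loop replaces in exactly the stable length-descending order
theorem pv_whileReplace_eq_foldl_sorted (etq : PySem.Dict String Int) :
    ∀ (fuel : Nat) (l : List String), l.length ≤ fuel → ∀ aR,
    whileReplace etq fuel aR l =
      (PySem.List.sorted l (fun s => PySem.Str.len s) true).foldl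
        (fun s e => PySem.Str.replace s e (pyHex (etq.getD e 0))) aR := by
  intro fuel
  induction fuel with
  | zero =>
    intro l hl aR
    rw [List.eq_nil_of_length_eq_zero (Nat.le_zero.mp hl)]
    rfl
  | succ fuel ih =>
    intro l hl aR
    cases hmax : PySem.List.max? l (fun s => PySem.Str.len s) with
    | none =>
      have : l = [] := (PySem.List.max?_eq_none_iff _ _).mp hmax
      subst this
      rfl
    | some et =>
      have hm : et ∈ l := PySem.List.max?_mem hmax
      have hrem := PySem.List.remove?_eq_some_erase l et hm
      have hlen : (l.erase et).length ≤ fuel := by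
        rw [List.length_erase_of_mem hm]
        have : l.length ≠ 0 := by cases l <;> simp_all
        omega
      rw [show whileReplace etq (fuel + 1) aR l =
          whileReplace etq fuel (PySem.Str.replace aR et (pyHex (etq.getD et 0))) (l.erase et) by
        simp only [whileReplace]
        simp only [hmax, hrem]]
      rw [ih (l.erase et) hlen _, pv_sorted_rev_eq_max_cons l _ hmax, List.foldl_cons]

-- a stable sort commutes with filter
theorem pv_filter_sorted_rev {α κ : Type} [BEq α] [LawfulBEq α] [LinearOrder κ]
    (key : α → κ) (p : α → Bool) :
    ∀ (xs : List α),
    (PySem.List.sorted xs key true).filter p = PySem.List.sorted (xs.filter p) key true := by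
  have H : ∀ (n : Nat) (xs : List α), xs.length = n →
      (PySem.List.sorted xs key true).filter p = PySem.List.sorted (xs.filter p) key true := by
    intro n
    induction n using Nat.strong_induction_on with
    | _ n ih =>
      intro xs hn
      cases hmax : PySem.List.max? xs key with
      | none =>
        have : xs = [] := (PySem.List.max?_eq_none_iff _ _).mp hmax
        subst this
        rfl
      | some m =>
        have hm : m ∈ xs := PySem.List.max?_mem hmax
        obtain ⟨l, r, rfl, hl, hr⟩ := pv_max?_split hmax
        have hml : m ∉ l := fun hx => absurd (hl m hx) (lt_irrefl _)
        have herase : (l ++ m :: r).erase m = l ++ r := by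
          rw [List.erase_append_right _ hml, List.erase_cons_head]
        have hlen : (l ++ r).length < n := by
          subst hn; simp
        have ihe := ih (l ++ r).length hlen (l ++ r) rfl
        rw [pv_sorted_rev_eq_max_cons _ _ hmax, herase]
        by_cases hp : p m = true
        · rw [List.filter_cons_of_pos hp, ihe]
          have hmaxf : PySem.List.max? ((l ++ m :: r).filter p) key = some m := by
            rw [List.filter_append, List.filter_cons_of_pos hp]
            exact pv_max?_of_split key _ _ m
              (fun y hy => hl y (List.mem_of_mem_filter hy))
              (fun y hy => hr y (List.mem_of_mem_filter hy))
          rw [pv_sorted_rev_eq_max_cons _ _ hmaxf]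
          have herasef : ((l ++ m :: r).filter p).erase m = (l ++ r).filter p := by
            rw [List.filter_append, List.filter_cons_of_pos hp,
              List.erase_append_right _ (fun hx => hml (List.mem_of_mem_filter hx)),
              List.erase_cons_head, List.filter_append]
          rw [herasef]
        · rw [List.filter_cons_of_neg (by simp_all), ihe]
          have : (l ++ m :: r).filter p = (l ++ r).filter p := by
            rw [List.filter_append, List.filter_append,
              List.filter_cons_of_neg (by simp_all)]
          rw [this]
  intro xs
  exact H xs.length xs rfl

-- --- bridging the two table builders and the two line scans ---

theorem pv_find?_eq_head?_filter {α : Type} (p : α → Bool) (l : List α) :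
    l.find? p = (l.filter p).head? := by
  induction l with
  | nil => rfl
  | cons x t ih =>
    by_cases hx : p x = true
    · simp [List.find?_cons_of_pos hx, List.filter_cons_of_pos hx]
    · simp only [Bool.not_eq_true] at hx
      rw [List.find?_cons_of_neg (by simp [hx]), List.filter_cons_of_neg (by simp [hx]), ih]

theorem pv_tabla_eq (lineas_texto : List String) :
    tablaEtiquetas lineas_texto = encontrarEtiquetas lineas_texto := by
  unfold tablaEtiquetas encontrarEtiquetas
  rw [PySem.List.enumerate_eq_map_pyRange lineas_texto "", List.foldl_map]
  congr 1
  apply PySem.List.foldl_congr_mem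
  intro st i _
  dsimp only
  by_cases hany : instrucciones.keys.any (fun c => PySem.Str.isIn c (PySem.List.pyGetD lineas_texto i "")) = true
  · have hfil : instrucciones.keys.filter
        (fun clave => PySem.Str.isIn clave (PySem.List.pyGetD lineas_texto i "")) ≠ [] := by
      rw [Ne, List.filter_eq_nil_iff]
      obtain ⟨c, hc, hc2⟩ := List.any_eq_true.mp hany
      exact fun h => h c hc hc2
    rw [if_pos hany, if_pos hfil]
    by_cases hret : PySem.Str.isIn "RET" (PySem.List.pyGetD lineas_texto i "") = true
    · rw [if_pos hret, if_pos hret]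
    · rw [if_neg hret, if_neg hret]
  · have hfil : ¬ instrucciones.keys.filter
        (fun clave => PySem.Str.isIn clave (PySem.List.pyGetD lineas_texto i "")) ≠ [] := by
      simp only [ne_eq, not_not, List.filter_eq_nil_iff]
      intro a ha
      simp only [List.any_eq_true, not_exists, not_and] at hany
      · simp_all
    rw [if_neg hany, if_neg hfil]

theorem pv_alt_eq (lineas_texto : List String) :
    traducirEtiquetas_alt lineas_texto = traducirEtiquetas lineas_texto := by
  unfold traducirEtiquetas_alt traducirEtiquetas
  rw [pv_tabla_eq]
  apply PySem.List.foldl_congr_mem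
  intro res linea _
  dsimp only
  rcases hfil : instrucciones.keys.filter (fun clave => PySem.Str.isIn clave linea) with _ | ⟨i0, tail⟩ <;>
    simp only [pv_find?_eq_head?_filter, hfil, List.head?_nil, List.head?_cons]
  rw [pv_filter_sorted_rev (fun s => PySem.Str.len s) (fun e => PySem.Str.isIn e linea)
    (encontrarEtiquetas lineas_texto).keys]
  by_cases he : (encontrarEtiquetas lineas_texto).keys.filter (fun e => PySem.Str.isIn e linea) ≠ []
  · have hs : PySem.List.sorted
        ((encontrarEtiquetas lineas_texto).keys.filter (fun e => PySem.Str.isIn e linea))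
        (fun s => PySem.Str.len s) true ≠ [] := by
      rw [Ne, PySem.List.sorted_eq_nil_iff]
      exact he
    rw [if_pos hs, if_pos he,
      pv_whileReplace_eq_foldl_sorted (encontrarEtiquetas lineas_texto) _ _ (le_refl _) linea]
  · have hs : ¬ PySem.List.sorted
        ((encontrarEtiquetas lineas_texto).keys.filter (fun e => PySem.Str.isIn e linea))
        (fun s => PySem.Str.len s) true ≠ [] := by
      rw [not_not] at he ⊢
      rw [PySem.List.sorted_eq_nil_iff]
      exact he
    rw [if_neg hs, if_neg he]

-- ===== VERDICT (by name: the statement is the Claim_ definition above) =====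
theorem traducirEtiquetas_spec : Claim_equal_traducirEtiquetas := by
  intro lineas_texto _ _
  unfold Spec_traducirEtiquetas
  exact (pv_alt_eq lineas_texto).symm
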